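-- pv_equiv track=rewrite | github.com/EliyahuAI/mcp-server-hyperplexity | src/shared/shared_table_parser.py | _trim_trailing_empty
-- ===== SOURCE A (Python) =====
-- def _trim_trailing_empty(row):
--     """Remove trailing empty cells from a row."""
--     # Find the last non-empty cell
--     last_content_idx = -1
--     for i, cell in enumerate(row):
--         if cell is not None and str(cell).strip():
--             last_content_idx = i
--
--     # Return row up to the last content
--     if last_content_idx >= 0:
--         return row[:last_content_idx + 1]
--     else:
--         return row[:1] if row else []  # Keep at least one column
-- ===== SOURCE B (Python) =====
-- def _trim_trailing_empty(row):
--     """Remove trailing empty cells from a row.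
--
--     Scans from the end and returns as soon as the last non-empty cell is found
--     (no accumulator, early exit), instead of A's full forward pass."""
--     for i in range(len(row) - 1, -1, -1):
--         cell = row[i]
--         if cell is not None and str(cell).strip():
--             return row[:i + 1]
--     return row[:1] if row else []
-- ===== Notes on version B (the rewrite author's own statement) =====
-- stated objective: simpler
-- what changed: Replaced the forward whole-row scan that maintains a last_content_idx accumulator with a reverse scan that returns row[:i+1] immediately at the first non-empty cell from the end.
import Mathlib
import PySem

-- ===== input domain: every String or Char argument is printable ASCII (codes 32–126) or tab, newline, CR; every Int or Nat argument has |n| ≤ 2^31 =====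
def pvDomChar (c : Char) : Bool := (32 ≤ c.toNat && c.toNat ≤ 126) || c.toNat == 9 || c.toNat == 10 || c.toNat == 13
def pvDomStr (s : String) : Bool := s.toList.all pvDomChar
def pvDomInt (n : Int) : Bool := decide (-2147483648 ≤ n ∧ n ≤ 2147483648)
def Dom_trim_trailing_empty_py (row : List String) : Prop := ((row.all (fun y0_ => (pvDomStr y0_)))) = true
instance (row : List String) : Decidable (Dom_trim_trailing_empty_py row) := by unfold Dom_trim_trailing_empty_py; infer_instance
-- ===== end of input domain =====

-- B replaces A's forward accumulator scan by a reverse scan with early exit; same return value, no speed claim.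

-- ===== PORT A =====
-- forward pass: last_content_idx over enumerate(row); cells are strings, so
-- `cell is not None and str(cell).strip()` is exactly `strip cell ≠ ""`
def trim_trailing_empty_py (row : List String) : List String :=
  let last_content_idx : Int :=
    (PySem.List.enumerate row 0).foldl
      (fun acc p => if PySem.Str.strip p.2 ≠ "" then p.1 else acc) (-1)
  if last_content_idx ≥ 0 then
    PySem.List.slice row none (some (last_content_idx + 1))
  else
    if row ≠ [] then PySem.List.slice row none (some 1) else []

-- ===== PORT B =====
-- reverse loop `for i in range(len(row)-1, -1, -1)` as a countdown recursion;
-- `row[i]` is in range (i < len row), ported as getD with an unreachable default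
def trim_alt_go (row : List String) : Nat → List String
  | 0 => if row ≠ [] then PySem.List.slice row none (some 1) else []
  | i + 1 =>
    if PySem.Str.strip (row.getD i "") ≠ "" then PySem.List.slice row none (some ((i : Int) + 1))
    else trim_alt_go row i

def trim_trailing_empty_py_alt (row : List String) : List String :=
  trim_alt_go row row.length

-- ===== PRECONDITION & SPEC =====
def Spec_trim_trailing_empty_py (row : List String) (out : List String) : Prop := out = trim_trailing_empty_py_alt row
instance (row : List String) (out : List String) : Decidable (Spec_trim_trailing_empty_py row out) := by unfold Spec_trim_trailing_empty_py; infer_instance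

-- ===== CLAIM (what is proved, stated in full; the proofs are below) =====
def Claim_equal_trim_trailing_empty_py : Prop := ∀ (row : List String), Dom_trim_trailing_empty_py row → Spec_trim_trailing_empty_py row (trim_trailing_empty_py row)

-- ===== LEMMAS AND PROOFS =====

-- A's fold, standalone for reasoning
def pvFoldIdx (row : List String) : Int :=
  (PySem.List.enumerate row 0).foldl
    (fun acc p => if PySem.Str.strip p.2 ≠ "" then p.1 else acc) (-1)

theorem pvFoldIdx_append (xs : List String) (x : String) :
    pvFoldIdx (xs ++ [x]) =
      if PySem.Str.strip x ≠ "" then (xs.length : Int) else pvFoldIdx xs := by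
  simp [pvFoldIdx, PySem.List.enumerate_append, List.foldl_append,
    PySem.List.enumerate_cons, PySem.List.enumerate_nil]

theorem pvFoldIdx_lt_length (xs : List String) (h : 0 ≤ pvFoldIdx xs) :
    pvFoldIdx xs < (xs.length : Int) := by
  induction xs using List.reverseRecOn with
  | nil => simp [pvFoldIdx, PySem.List.enumerate_nil] at h
  | append_singleton ys y ih =>
    rw [pvFoldIdx_append] at h ⊢
    by_cases hy : PySem.Str.strip y = ""
    · simp only [hy, ne_eq, not_true_eq_false, if_false] at h ⊢
      have h2 := ih h
      simp only [List.length_append, List.length_cons, List.length_nil]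
      push_cast
      omega
    · simp only [hy, ne_eq, not_false_eq_true, if_true,
        List.length_append, List.length_cons, List.length_nil]
      push_cast
      omega

theorem pvFoldIdx_neg_all_empty (xs : List String) (h : pvFoldIdx xs < 0) :
    ∀ c ∈ xs, PySem.Str.strip c = "" := by
  induction xs using List.reverseRecOn with
  | nil => simp
  | append_singleton ys y ih =>
    rw [pvFoldIdx_append] at h
    by_cases hy : PySem.Str.strip y = ""
    · simp only [hy, ne_eq, not_true_eq_false, if_false] at h
      intro c hc
      rcases List.mem_append.mp hc with h1 | h1
      · exact ih h c h1
      · simp at h1; simpa [h1] using hy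
    · simp only [hy, ne_eq, not_false_eq_true, if_true] at h
      have := Int.natCast_nonneg ys.length
      omega

theorem pvSliceOne_append (xs : List String) (x : String) (hxs : xs ≠ []) :
    PySem.List.slice (xs ++ [x]) none (some 1) = PySem.List.slice xs none (some 1) := by
  have h1 : 1 ≤ xs.length := Nat.one_le_iff_ne_zero.mpr (by simpa using hxs)
  have hc : ((1 : Nat) : Int) = (1 : Int) := by norm_num
  rw [← hc, PySem.List.slice_to_natCast, PySem.List.slice_to_natCast,
    List.take_append_of_le_length h1]

-- B's countdown is unaffected by appending a cell, as long as it never looks past xs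
theorem trim_alt_go_append (xs : List String) (x : String) (hxs : xs ≠ []) :
    ∀ i, i ≤ xs.length → trim_alt_go (xs ++ [x]) i = trim_alt_go xs i := by
  intro i
  induction i with
  | zero =>
    intro _
    simp only [trim_alt_go]
    rw [if_pos (show xs ++ [x] ≠ [] by simp), if_pos hxs, pvSliceOne_append xs x hxs]
  | succ j ih =>
    intro hle
    have hj : j < xs.length := by omega
    have hget : (xs ++ [x])[j]?.getD "" = xs[j]?.getD "" := by
      rw [List.getElem?_append_left hj]
    simp only [trim_alt_go, List.getD_eq_getElem?_getD, hget]
    by_cases hc : PySem.Str.strip (xs[j]?.getD "") = ""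
    · simp only [hc, ne_eq, not_true_eq_false, if_false]
      exact ih (by omega)
    · simp only [hc, ne_eq, not_false_eq_true, if_true]
      have hcast : ((j : Int) + 1) = (((j + 1 : Nat)) : Int) := by push_cast; ring
      rw [hcast, PySem.List.slice_to_natCast, PySem.List.slice_to_natCast,
        List.take_append_of_le_length hle]

-- when every cell seen by the countdown is empty, it falls through to row[:1]
theorem trim_alt_go_all_empty (row : List String) (hrow : row ≠ [])
    (hall : ∀ c ∈ row, PySem.Str.strip c = "") :
    ∀ i, i ≤ row.length → trim_alt_go row i = PySem.List.slice row none (some 1) := by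
  intro i
  induction i with
  | zero => intro _; simp [trim_alt_go, hrow]
  | succ j ih =>
    intro hle
    have hj : j < row.length := by omega
    have hmem : row[j]?.getD "" ∈ row := by
      rw [List.getElem?_eq_getElem hj]
      exact List.getElem_mem hj
    simp only [trim_alt_go, List.getD_eq_getElem?_getD, hall _ hmem, ne_eq,
      not_true_eq_false, if_false]
    exact ih (by omega)

-- A's port with its let-bound fold named (definitional)
theorem trim_A_eq (row : List String) :
    trim_trailing_empty_py row =
      if pvFoldIdx row ≥ 0 then PySem.List.slice row none (some (pvFoldIdx row + 1))
      else if row ≠ [] then PySem.List.slice row none (some 1) else [] := rfl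

theorem trim_eq (row : List String) :
    trim_trailing_empty_py row = trim_trailing_empty_py_alt row := by
  induction row using List.reverseRecOn with
  | nil => rfl
  | append_singleton xs x ih =>
    rw [trim_A_eq, pvFoldIdx_append]
    have hget : (xs ++ [x])[xs.length]?.getD "" = x := by
      simp
    have hlen : (xs ++ [x]).length = xs.length + 1 := by simp
    have hstepB : trim_trailing_empty_py_alt (xs ++ [x]) =
        (if PySem.Str.strip x ≠ "" then
            PySem.List.slice (xs ++ [x]) none (some ((xs.length : Int) + 1))
          else trim_alt_go (xs ++ [x]) xs.length) := by
      unfold trim_trailing_empty_py_alt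
      rw [hlen]
      simp only [trim_alt_go, List.getD_eq_getElem?_getD, hget]
    rw [hstepB]
    by_cases hx : PySem.Str.strip x = ""
    · simp only [hx, ne_eq, not_true_eq_false, if_false]
      by_cases h0 : 0 ≤ pvFoldIdx xs
      · have hlt := pvFoldIdx_lt_length xs h0
        have hxs : xs ≠ [] := by
          intro h; subst h
          simp [pvFoldIdx, PySem.List.enumerate_nil] at h0
        rw [trim_alt_go_append xs x hxs xs.length le_rfl]
        have hB : trim_alt_go xs xs.length = trim_trailing_empty_py_alt xs := rfl
        rw [hB, ← ih, trim_A_eq, if_pos (show pvFoldIdx xs ≥ 0 from h0),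
          if_pos (show pvFoldIdx xs ≥ 0 from h0)]
        have hcast : pvFoldIdx xs + 1 = (((pvFoldIdx xs + 1).toNat : Nat) : Int) := by omega
        rw [hcast, PySem.List.slice_to_natCast, PySem.List.slice_to_natCast,
          List.take_append_of_le_length (by omega)]
      · have hall : ∀ c ∈ xs ++ [x], PySem.Str.strip c = "" := by
          intro c hc
          rcases List.mem_append.mp hc with h1 | h1
          · exact pvFoldIdx_neg_all_empty xs (by omega) c h1
          · simp at h1; simpa [h1] using hx
        rw [trim_alt_go_all_empty (xs ++ [x]) (by simp) hall xs.length (by omega),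
          if_neg (show ¬ pvFoldIdx xs ≥ 0 from h0), if_pos (show xs ++ [x] ≠ [] by simp)]
    · simp only [hx, ne_eq, not_false_eq_true, if_true]
      rw [if_pos (show ((xs.length : Int)) ≥ 0 from Int.natCast_nonneg _)]

-- ===== VERDICT (by name: the statement is the Claim_ definition above) =====
theorem trim_trailing_empty_py_spec : Claim_equal_trim_trailing_empty_py := by
  intro row _
  exact trim_eq row
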